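-- pv_equiv track=rewrite | github.com/OCWC22/rlm-mcp-server | rlm_mcp.py | _compute_spans
-- ===== SOURCE A (Python) =====
-- def _compute_spans(n: int, size: int, overlap: int) -> list[list[int]]:
--     if size <= 0:
--         raise ValueError("size must be > 0")
--     if overlap < 0 or overlap >= size:
--         raise ValueError("overlap must satisfy 0 <= overlap < size")
--     step = size - overlap
--     spans: list[list[int]] = []
--     for start in range(0, n, step):
--         end = min(n, start + size)
--         spans.append([start, end])
--         if end >= n:
--             break
--     return spans
-- ===== SOURCE B (Python) =====
-- def _compute_spans(n: int, size: int, overlap: int) -> list[list[int]]: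
--     if size <= 0:
--         raise ValueError("size must be > 0")
--     if overlap < 0 or overlap >= size:
--         raise ValueError("overlap must satisfy 0 <= overlap < size")
--     step = size - overlap
--     if n <= 0:
--         return []
--     num = max(1, (n - size + step - 1) // step + 1)
--     return [[i * step, min(n, i * step + size)] for i in range(num)]
-- ===== Notes on version B (the rewrite author's own statement) =====
-- stated objective: simpler
-- what changed: Replaces the accumulate-until-break loop by computing the window count in closed form and generating all spans with a single comprehension.
import Mathlib
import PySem

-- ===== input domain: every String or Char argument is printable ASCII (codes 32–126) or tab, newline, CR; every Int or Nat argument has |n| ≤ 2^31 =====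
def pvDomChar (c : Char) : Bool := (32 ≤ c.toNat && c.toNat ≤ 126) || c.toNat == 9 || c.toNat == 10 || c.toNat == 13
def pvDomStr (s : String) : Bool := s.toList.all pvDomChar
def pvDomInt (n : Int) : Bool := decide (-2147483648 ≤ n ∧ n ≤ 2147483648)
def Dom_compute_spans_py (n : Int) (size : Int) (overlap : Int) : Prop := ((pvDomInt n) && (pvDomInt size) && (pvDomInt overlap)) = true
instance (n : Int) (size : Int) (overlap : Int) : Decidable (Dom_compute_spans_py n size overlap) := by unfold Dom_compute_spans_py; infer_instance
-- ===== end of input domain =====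

-- B replaces A's accumulate-until-break loop by a closed-form window count and a single
-- generating comprehension (objective: simpler).

-- ===== PORT A =====
-- the for-loop body of A: append [start, min n (start+size)], break once end ≥ n
def pvGoA (n : Int) (size : Int) : List Int → List (List Int)
  | [] => []
  | s :: rest =>
    let e := min n (s + size)
    [s, e] :: (if e ≥ n then [] else pvGoA n size rest)

def compute_spans_py (n : Int) (size : Int) (overlap : Int) : List (List Int) :=
  let step := size - overlap
  pvGoA n size (PySem.List.pyRange 0 n step)

-- ===== PORT B =====
def compute_spans_py_alt (n : Int) (size : Int) (overlap : Int) : List (List Int) :=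
  let step := size - overlap
  if n ≤ 0 then []
  else
    let num := max 1 (PySem.Int.floordiv (n - size + step - 1) step + 1)
    (PySem.List.pyRange 0 num 1).map (fun i => [i * step, min n (i * step + size)])

-- ===== PRECONDITION & SPEC =====
-- Pre_ excludes exactly the inputs on which A raises ValueError (size ≤ 0, or overlap outside [0, size))
def Pre_compute_spans_py (n : Int) (size : Int) (overlap : Int) : Prop :=
  0 < size ∧ 0 ≤ overlap ∧ overlap < size
instance (n : Int) (size : Int) (overlap : Int) : Decidable (Pre_compute_spans_py n size overlap) := by unfold Pre_compute_spans_py; infer_instance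

def pvWitness_compute_spans_py : Int × Int × Int := (10, 4, 1)

def Spec_compute_spans_py (n : Int) (size : Int) (overlap : Int) (out : List (List Int)) : Prop := out = compute_spans_py_alt n size overlap
instance (n : Int) (size : Int) (overlap : Int) (out : List (List Int)) : Decidable (Spec_compute_spans_py n size overlap out) := by unfold Spec_compute_spans_py; infer_instance

-- ===== CLAIM (what is proved, stated in full; the proofs are below) =====
def Claim_equal_compute_spans_py : Prop := ∀ (n : Int) (size : Int) (overlap : Int), Dom_compute_spans_py n size overlap → Pre_compute_spans_py n size overlap → Spec_compute_spans_py n size overlap (compute_spans_py n size overlap)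

-- ===== LEMMAS AND PROOFS =====

-- number of spans that remain when the next window starts at a (as B counts them, shifted)
def pvN (n : Int) (size : Int) (step : Int) (a : Int) : Nat :=
  (max 1 ((n - size - a + step - 1) / step + 1)).toNat

theorem pvGoA_range (n size step : Int) (hs : 0 < step) (hss : step ≤ size) :
    ∀ (m : Nat) (a : Int), a < n → pvN n size step a ≤ m →
      pvGoA n size ((List.range m).map (fun (k : Nat) => a + step * (k : Int))) =
        (List.range (pvN n size step a)).map
          (fun (k : Nat) => [a + step * (k : Int), min n (a + step * (k : Int) + size)]) := by
  intro m
  induction m with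
  | zero =>
    intro a _ hm
    have h1 : 1 ≤ pvN n size step a := by unfold pvN; omega
    exfalso; omega
  | succ m ih =>
    intro a ha hm
    have hN1 : 1 ≤ pvN n size step a := by unfold pvN; omega
    rw [List.range_succ_eq_map, List.map_cons, List.map_map, pvGoA]
    by_cases hb : n ≤ a + size
    · -- break: this is the last span
      have hq : (n - size - a + step - 1) / step < 1 := by
        rw [Int.ediv_lt_iff_lt_mul hs]; omega
      have hNa : pvN n size step a = 1 := by unfold pvN; omega
      rw [hNa]
      have he : min n (a + step * ((0:Nat) : Int) + size) ≥ n := by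
        simp only [Nat.cast_zero, Int.mul_zero, Int.add_zero]; omega
      simp only [Nat.cast_zero, Int.mul_zero, Int.add_zero] at he ⊢
      rw [if_pos he]
      simp
    · -- no break: recurse at start a + step
      push_neg at hb
      have hq1 : 1 ≤ (n - size - a + step - 1) / step := by
        rw [Int.le_ediv_iff_mul_le hs]; omega
      have hshift : (n - size - (a + step) + step - 1) / step
          = (n - size - a + step - 1) / step - 1 := by
        have h0 := Int.add_mul_ediv_right (n - size - (a + step) + step - 1) 1 (by omega : step ≠ 0)
        have harg : n - size - (a + step) + step - 1 + 1 * step = n - size - a + step - 1 := by ring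
        rw [harg] at h0
        omega
      have hNshift : pvN n size step (a + step) = pvN n size step a - 1 := by
        unfold pvN; omega
      have ha' : a + step < n := by omega
      have hm' : pvN n size step (a + step) ≤ m := by omega
      have hrec := ih (a + step) ha' hm'
      have hmapeq : (List.range m).map ((fun (k : Nat) => a + step * (k : Int)) ∘ (fun k => k + 1))
          = (List.range m).map (fun (k : Nat) => (a + step) + step * (k : Int)) := by
        apply List.map_congr_left; intro k _
        simp only [Function.comp_apply, Nat.cast_add, Nat.cast_one]; ring
      rw [hmapeq, hrec]
      have he : ¬ (min n (a + step * ((0:Nat) : Int) + size) ≥ n) := by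
        simp only [Nat.cast_zero, Int.mul_zero, Int.add_zero]; omega
      simp only [Nat.cast_zero, Int.mul_zero, Int.add_zero] at he ⊢
      rw [if_neg he]
      -- peel the head off the RHS range
      have hNa : pvN n size step a = (pvN n size step a - 1) + 1 := by omega
      rw [hNa, List.range_succ_eq_map, List.map_cons, List.map_map, hNshift]
      simp only [Nat.cast_zero, Int.mul_zero, Int.add_zero]
      refine congrArg₂ _ rfl ?_
      apply List.map_congr_left; intro k _
      simp only [Function.comp_apply, List.cons.injEq, and_true]
      refine ⟨by push_cast; ring, ?_⟩
      congr 1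
      push_cast; ring

theorem compute_spans_py_spec' (n size overlap : Int)
    (hpre : Pre_compute_spans_py n size overlap) :
    compute_spans_py n size overlap = compute_spans_py_alt n size overlap := by
  obtain ⟨hsz, hov0, hov⟩ := hpre
  simp only [compute_spans_py, compute_spans_py_alt]
  set step := size - overlap with hstep
  have hs : 0 < step := by omega
  have hss : step ≤ size := by omega
  rw [PySem.List.pyRange_of_pos _ _ hs]
  by_cases hn : n ≤ 0
  · rw [if_pos hn, if_neg (by omega : ¬ (0:Int) < n)]
    simp [pvGoA]
  · push_neg at hn
    rw [if_pos (by omega : (0:Int) < n), if_neg (by omega : ¬ n ≤ 0)]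
    rw [PySem.Int.floordiv_eq_ediv_of_pos hs]
    set num : Int := max 1 ((n - size + step - 1) / step + 1) with hnum
    have hnum1 : 1 ≤ num := by omega
    rw [PySem.List.pyRange_of_pos _ _ (by omega : (0:Int) < 1)]
    rw [if_pos (by omega : (0:Int) < num)]
    have hcd : ((num - 0 + 1 - 1) / 1).toNat = num.toNat := by omega
    rw [hcd]
    have hkey := pvGoA_range n size step hs hss
      (((n - 0 + step - 1) / step).toNat) 0 (by omega)
      (by
        unfold pvN
        have h1 : (n - size - 0 + step - 1) / step + 1
            = (n - size - 0 + step - 1 + 1 * step) / step := by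
          rw [Int.add_mul_ediv_right _ _ (by omega : step ≠ 0)]
        have hmono : (n - size - 0 + step - 1 + 1 * step) / step ≤ (n - 0 + step - 1) / step :=
          Int.ediv_le_ediv hs (by omega)
        have hge1 : 1 ≤ (n - 0 + step - 1) / step := by
          rw [Int.le_ediv_iff_mul_le hs]; omega
        omega)
    simp only [Int.zero_add, Int.one_mul] at hkey ⊢
    rw [hkey, List.map_map]
    have hNnum : pvN n size step 0 = num.toNat := by
      unfold pvN
      have h0 : n - size - 0 + step - 1 = n - size + step - 1 := by ring
      rw [h0]
    rw [hNnum]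
    apply List.map_congr_left; intro k _
    simp only [Function.comp_apply, List.cons.injEq, and_true]
    refine ⟨by ring, ?_⟩
    congr 1
    ring

-- ===== VERDICT (by name: the statement is the Claim_ definition above) =====
theorem compute_spans_py_spec : Claim_equal_compute_spans_py := by
  intro n size overlap _ hpre
  exact compute_spans_py_spec' n size overlap hpre
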